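-- pv_equiv track=rewrite | github.com/TianYubo/cs336_assignment_1 | cs336_basics/char_based_bpe_class.py | merge_all_pairs
-- ===== SOURCE A (Python) =====
-- def merge_all_pairs(char_tuple: tuple, target_pair: tuple):
--     """合并元组中所有出现的目标字符对"""
--     char_list = list(char_tuple)
--     merged_token = ''.join(target_pair)
--
--     # 从后往前处理，避免索引变化的问题
--     i = len(char_list) - 2
--     while i >= 0:
--         if (char_list[i], char_list[i+1]) == target_pair:
--             char_list[i] = merged_token
--             char_list.pop(i+1)
--         i -= 1
--
--     return tuple(char_list)
-- ===== SOURCE B (Python) =====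
-- def merge_all_pairs(char_tuple: tuple, target_pair: tuple):
--     """Single right-to-left pass with a stack instead of repeated pops."""
--     if len(target_pair) != 2:
--         return tuple(char_tuple)
--     x, y = target_pair
--     merged = x + y
--     acc = []  # reversed order: acc[-1] is leftmost processed element
--     for t in reversed(char_tuple):
--         if t == x and acc and acc[-1] == y:
--             acc[-1] = merged
--         else:
--             acc.append(t)
--     acc.reverse()
--     return tuple(acc)
-- ===== Notes on version B (the rewrite author's own statement) =====
-- stated objective: faster
-- what changed: Replaces A's right-to-left scan over a mutating list with O(n) pops by a single linear right-to-left pass that builds the result on a stack, replacing the top with the merged token on a match.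
import Mathlib
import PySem

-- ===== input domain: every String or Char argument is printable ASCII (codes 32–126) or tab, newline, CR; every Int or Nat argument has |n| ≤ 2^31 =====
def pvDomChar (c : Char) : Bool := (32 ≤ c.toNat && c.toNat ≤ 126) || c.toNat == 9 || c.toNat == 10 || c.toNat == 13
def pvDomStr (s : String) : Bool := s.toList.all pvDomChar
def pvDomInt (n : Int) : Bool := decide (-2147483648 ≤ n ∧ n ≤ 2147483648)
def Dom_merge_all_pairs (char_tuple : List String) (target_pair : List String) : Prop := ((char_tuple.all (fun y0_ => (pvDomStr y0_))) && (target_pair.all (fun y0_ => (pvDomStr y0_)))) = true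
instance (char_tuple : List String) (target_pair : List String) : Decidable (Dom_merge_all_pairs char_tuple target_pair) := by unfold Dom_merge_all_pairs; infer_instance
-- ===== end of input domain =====

-- B replaces A's quadratic right-to-left scan with in-place pops by a single linear
-- right-to-left pass over the input that builds the result on a stack (objective: faster).

-- ===== PORT A =====
-- A's while-loop: i runs from len-2 down to 0 over the mutating char_list; fuel = i+1.
-- char_list[i], char_list[i+1] are always in range in A (i ≥ 0, i+1 ≤ current len-1),
-- so the in-range accesses are ported with getD; set/eraseIdx are Python's
-- `char_list[i] = merged` / `char_list.pop(i+1)` at these in-range indices.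
def mergeAllLoop (tp : List String) (merged : String) : Nat → List String → List String
  | 0, cl => cl
  | i+1, cl =>
      mergeAllLoop tp merged i
        (if [cl.getD i "", cl.getD (i+1) ""] = tp
         then (cl.set i merged).eraseIdx (i+1)
         else cl)

def merge_all_pairs (char_tuple : List String) (target_pair : List String) : List String :=
  mergeAllLoop target_pair (PySem.Str.join "" target_pair) (char_tuple.length - 1) char_tuple

-- ===== PORT B =====
-- Source B: unpack the pair, then one fold over reversed(char_tuple); the Python stack `acc`
-- (kept reversed, acc[-1] = leftmost processed element) is the Lean list with its head
-- at Python's acc[-1], so Python's final acc.reverse() is the identity here.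
def merge_all_pairs_alt (char_tuple : List String) (target_pair : List String) : List String :=
  match target_pair with
  | [x, y] =>
      let merged := x ++ y
      char_tuple.reverse.foldl (fun acc t =>
        match acc with
        | h :: r => if t == x && h == y then merged :: r else t :: acc
        | [] => [t]) []
  | _ => char_tuple

-- ===== PRECONDITION & SPEC =====
def Spec_merge_all_pairs (char_tuple : List String) (target_pair : List String) (out : List String) : Prop := out = merge_all_pairs_alt char_tuple target_pair
instance (char_tuple : List String) (target_pair : List String) (out : List String) : Decidable (Spec_merge_all_pairs char_tuple target_pair out) := by unfold Spec_merge_all_pairs; infer_instance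

-- ===== CLAIM (what is proved, stated in full; the proofs are below) =====
def Claim_equal_merge_all_pairs : Prop := ∀ (char_tuple : List String) (target_pair : List String), Dom_merge_all_pairs char_tuple target_pair → Spec_merge_all_pairs char_tuple target_pair (merge_all_pairs char_tuple target_pair)

-- ===== LEMMAS AND PROOFS =====

-- B's step function, in foldr orientation.
def mergeStep (x y merged : String) (t : String) (acc : List String) : List String :=
  match acc with
  | h :: r => if t == x && h == y then merged :: r else t :: acc
  | [] => [t]

lemma alt_eq_foldr (ct : List String) (x y : String) :
    merge_all_pairs_alt ct [x, y] = ct.foldr (mergeStep x y (x ++ y)) [] := by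
  simp only [merge_all_pairs_alt, List.foldl_reverse]
  rfl

lemma join_pair (x y : String) : PySem.Str.join "" [x, y] = x ++ y := by
  simp [PySem.Str.join, PySem.Chars.join, List.intercalate, String.ofList]
  rfl

-- If target_pair does not have length 2, A's loop never merges.
lemma mergeAllLoop_nomatch (tp : List String) (merged : String) (hlen : tp.length ≠ 2) :
    ∀ (k : Nat) (cl : List String), mergeAllLoop tp merged k cl = cl := by
  intro k
  induction k with
  | zero => intro cl; rfl
  | succ i ih =>
      intro cl
      rw [mergeAllLoop]
      split
      · next hc => exact absurd (by rw [← hc]; rfl) hlen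
      · exact ih cl

lemma getD_append_add (p l' : List String) (k : Nat) (d : String) :
    (p ++ l').getD (p.length + k) d = l'.getD k d := by
  simp [List.getD, List.getElem?_append_right]

lemma eraseIdx_append_succ (p : List String) (m h : String) (s : List String) :
    (p ++ m :: h :: s).eraseIdx (p.length + 1) = p ++ m :: s := by
  induction p with
  | nil => rfl
  | cons a p ih => simpa using ih

-- Loop/fold correspondence: after A's loop has processed the indices of `pre`
-- (right to left), the already-processed nonempty suffix `h :: s` is exactly
-- B's accumulator, and the remaining work is B's foldr over `pre`.
lemma mergeAllLoop_append (x y m : String) :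
    ∀ (pre : List String) (h : String) (s : List String),
      mergeAllLoop [x, y] m pre.length (pre ++ h :: s) =
        pre.foldr (mergeStep x y m) (h :: s) := by
  intro pre
  induction pre using List.reverseRecOn with
  | nil => intro h s; rfl
  | append_singleton p t ih =>
      intro h s
      have hget1 : (p ++ [t] ++ h :: s).getD p.length "" = t := by
        have h0 := getD_append_add p (t :: h :: s) 0 ""
        simp only [Nat.add_zero] at h0
        rw [List.append_assoc]; exact h0
      have hget2 : (p ++ [t] ++ h :: s).getD (p.length + 1) "" = h := by
        have h1 := getD_append_add p (t :: h :: s) 1 ""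
        rw [List.append_assoc]; exact h1
      have hlen : (p ++ [t]).length = p.length + 1 := by simp
      rw [hlen, mergeAllLoop, hget1, hget2]
      by_cases hc : t = x ∧ h = y
      · obtain ⟨hc1, hc2⟩ := hc
        have hcond : ([t, h] = [x, y]) := by simp [hc1, hc2]
        rw [if_pos hcond]
        have hset : ((p ++ [t] ++ h :: s).set p.length m) = p ++ m :: h :: s := by
          simp
        rw [hset, eraseIdx_append_succ, ih]
        have hstep : mergeStep x y m t (h :: s) = m :: s := by
          simp [mergeStep, hc1, hc2]
        rw [List.foldr_append]
        simp [hstep]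
      · have hcond : ¬ ([t, h] = [x, y]) := by
          simp only [List.cons.injEq, and_true]
          tauto
        rw [if_neg hcond]
        have : p ++ [t] ++ h :: s = p ++ t :: h :: s := by simp
        rw [this, ih]
        have hstep : mergeStep x y m t (h :: s) = t :: h :: s := by
          simp only [mergeStep, Bool.and_eq_true, beq_iff_eq]
          rw [if_neg (by tauto)]
        rw [List.foldr_append]
        simp [hstep]

-- ===== VERDICT (by name: the statement is the Claim_ definition above) =====
theorem merge_all_pairs_spec : Claim_equal_merge_all_pairs := by
  intro ct tp _
  unfold Spec_merge_all_pairs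
  match tp with
  | [x, y] =>
      rw [alt_eq_foldr]
      unfold merge_all_pairs
      rw [join_pair]
      induction ct using List.reverseRecOn with
      | nil => rfl
      | append_singleton p t _ =>
          have hlen : (p ++ [t]).length - 1 = p.length := by simp
          rw [hlen, show p ++ [t] = p ++ t :: [] from rfl,
            mergeAllLoop_append, List.foldr_append]
          rfl
  | [] => exact mergeAllLoop_nomatch [] _ (by simp) _ ct
  | [x] => exact mergeAllLoop_nomatch [x] _ (by simp) _ ct
  | x :: y :: z :: r =>
      exact mergeAllLoop_nomatch (x :: y :: z :: r) _ (by simp) _ ct
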